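-- pv_equiv track=rewrite | github.com/oilcrest/pwntools | pwnlib/shellcraft/registers.py | bits_required
-- ===== SOURCE A (Python) =====
-- def bits_required(value):
--     bits  = 0
--
--     if value < 0:
--         value = -(value)
--
--     while value:
--         value >>= 8
--         bits += 8
--     return bits
-- ===== SOURCE B (Python) =====
-- def bits_required(value):
--     return (abs(value).bit_length() + 7) // 8 * 8
-- ===== Notes on version B (the rewrite author's own statement) =====
-- stated objective: simpler
-- what changed: Replaces the shift-by-8-and-count loop with the closed form ((abs(value).bit_length()+7)//8)*8, removing both the loop and the sign branch.
import Mathlib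
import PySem

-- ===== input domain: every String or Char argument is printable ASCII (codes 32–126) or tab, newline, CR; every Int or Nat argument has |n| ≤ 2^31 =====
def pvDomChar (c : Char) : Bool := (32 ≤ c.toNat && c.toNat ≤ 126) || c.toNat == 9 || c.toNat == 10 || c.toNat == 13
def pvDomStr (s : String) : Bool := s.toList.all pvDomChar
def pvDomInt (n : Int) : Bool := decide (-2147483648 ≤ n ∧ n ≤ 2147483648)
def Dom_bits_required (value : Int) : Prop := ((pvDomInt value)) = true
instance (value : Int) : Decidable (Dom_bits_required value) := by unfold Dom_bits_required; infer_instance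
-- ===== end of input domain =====

-- B replaces A's shift-by-8-and-count loop (with a sign branch) by the closed form
-- ((bit_length |value|) + 7) / 8 * 8 — objective: simpler.

-- ===== PORT A =====
-- A's while loop: 'while value: value >>= 8; bits += 8'. The loop is only entered
-- with value ≥ 0 (the sign branch ran first), where Python's 'value >> 8' is exactly
-- Nat division by 256, so the loop state is carried as a Nat.
def bitsLoopA (v : Nat) (bits : Int) : Int :=
  if v = 0 then bits else bitsLoopA (v / 256) (bits + 8)
  termination_by v
  decreasing_by exact Nat.div_lt_self (Nat.pos_of_ne_zero (by assumption)) (by norm_num)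

def bits_required (value : Int) : Int :=
  bitsLoopA (if value < 0 then (-value).toNat else value.toNat) 0

-- ===== PORT B =====
-- Source B: (abs(value).bit_length() + 7) // 8 * 8; Nat.size is Python's bit_length on Nat.
def bits_required_alt (value : Int) : Int :=
  ((value.natAbs.size + 7) / 8 * 8 : Nat)

-- ===== PRECONDITION & SPEC =====
def Spec_bits_required (value : Int) (out : Int) : Prop := out = bits_required_alt value
instance (value : Int) (out : Int) : Decidable (Spec_bits_required value out) := by unfold Spec_bits_required; infer_instance

-- ===== CLAIM (what is proved, stated in full; the proofs are below) =====
def Claim_equal_bits_required : Prop := ∀ (value : Int), Dom_bits_required value → Spec_bits_required value (bits_required value)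

-- ===== LEMMAS AND PROOFS =====

lemma size_div256 (v : Nat) (h : 256 ≤ v) : (v / 256).size = v.size - 8 := by
  set s := v.size with hs
  have h9 : 9 ≤ s := by
    have : 8 < s := Nat.lt_size.mpr (by simpa using h)
    omega
  have hub : v / 256 < 2 ^ (s - 8) := by
    have hv : v < 2 ^ s := Nat.lt_size_self v
    have : v < 2 ^ (s - 8) * 256 := by
      have : (2 : Nat) ^ (s - 8) * 256 = 2 ^ s := by
        have : (256 : Nat) = 2 ^ 8 := by norm_num
        rw [this, ← pow_add]
        congr 1
        omega
      omega
    omega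
  have hlb : 2 ^ (s - 9) ≤ v / 256 := by
    have hv : 2 ^ (s - 1) ≤ v := Nat.lt_size.mp (by omega)
    have h1 : (2 : Nat) ^ (s - 9) * 256 = 2 ^ (s - 1) := by
      have : (256 : Nat) = 2 ^ 8 := by norm_num
      rw [this, ← pow_add]
      congr 1
      omega
    exact (Nat.le_div_iff_mul_le (by norm_num)).mpr (by omega)
  have hle : (v / 256).size ≤ s - 8 := Nat.size_le.mpr hub
  have hge : s - 9 < (v / 256).size := Nat.lt_size.mpr hlb
  omega

lemma bitsLoopA_eq (v : Nat) : ∀ b : Int, bitsLoopA v b = b + ((v.size + 7) / 8 * 8 : Nat) := by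
  induction v using Nat.strong_induction_on with
  | _ v ih =>
    intro b
    rw [bitsLoopA]
    by_cases h0 : v = 0
    · simp [h0, Nat.size_zero]
    · rw [if_neg h0, ih (v / 256) (Nat.div_lt_self (Nat.pos_of_ne_zero h0) (by norm_num))]
      by_cases hlt : v < 256
      · have hd : v / 256 = 0 := Nat.div_eq_of_lt hlt
        have h1 : 0 < v.size := Nat.size_pos.mpr (Nat.pos_of_ne_zero h0)
        have h2 : v.size ≤ 8 := Nat.size_le.mpr (by omega)
        have h3 : (v.size + 7) / 8 * 8 = 8 := by omega
        rw [hd, h3]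
        norm_num [Nat.size_zero]
      · rw [size_div256 v (by omega)]
        have h9 : 9 ≤ v.size := by
          have : 8 < v.size := Nat.lt_size.mpr (by simpa using (by omega : 256 ≤ v))
          omega
        have : (v.size - 8 + 7) / 8 * 8 + 8 = (v.size + 7) / 8 * 8 := by omega
        push_cast [← this]
        ring

-- ===== VERDICT (by name: the statement is the Claim_ definition above) =====
theorem bits_required_spec : Claim_equal_bits_required := by
  intro value _
  unfold Spec_bits_required bits_required bits_required_alt
  rw [bitsLoopA_eq]
  have : (if value < 0 then (-value).toNat else value.toNat) = value.natAbs := by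
    split_ifs with h <;> omega
  rw [this]
  ring
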